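-- pv_equiv track=rewrite | github.com/tradedgesystem/mlb-unicorn-engine | backend/app/tools/fangraphs_fetch.py | _extend_headers
-- ===== SOURCE A (Python) =====
-- def _dedupe_headers(headers: list[str]) -> list[str]:
--     seen: dict[str, int] = {}
--     deduped = []
--     for header in headers:
--         count = seen.get(header, 0)
--         deduped.append(f"{header}_{count}" if count else header)
--         seen[header] = count + 1
--     return deduped
--
-- def _extend_headers(headers: list[str], target_len: int) -> list[str]:
--     if len(headers) >= target_len:
--         return headers
--     extended = list(headers)
--     start = len(headers) + 1
--     for idx in range(start, target_len + 1):
--         extended.append(f"extra_col_{idx}")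
--     return _dedupe_headers(extended)
-- ===== SOURCE B (Python) =====
-- def _extend_headers(headers: list[str], target_len: int) -> list[str]:
--     if len(headers) >= target_len:
--         return headers
--     names = headers + [f"extra_col_{i}" for i in range(len(headers) + 1, target_len + 1)]
--     # total occurrences of each name
--     remaining = {}
--     for n in names:
--         remaining[n] = remaining.get(n, 0) + 1
--     # walk BACKWARD, decrementing: after the decrement, remaining[n] is the
--     # number of occurrences of n strictly before this position
--     out = []
--     for n in reversed(names):
--         remaining[n] -= 1
--         k = remaining[n]
--         out.append(n if k == 0 else f"{n}_{k}")
--     out.reverse()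
--     return out
-- ===== Notes on version B (the rewrite author's own statement) =====
-- stated objective: alternative
-- what changed: B drops A's forward seen-counter dedupe: it precomputes total occurrence counts, then traverses the padded list BACKWARD decrementing the totals (the decremented total equals the number of earlier occurrences, which is the suffix), building the output back-to-front and reversing it once.
import Mathlib
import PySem

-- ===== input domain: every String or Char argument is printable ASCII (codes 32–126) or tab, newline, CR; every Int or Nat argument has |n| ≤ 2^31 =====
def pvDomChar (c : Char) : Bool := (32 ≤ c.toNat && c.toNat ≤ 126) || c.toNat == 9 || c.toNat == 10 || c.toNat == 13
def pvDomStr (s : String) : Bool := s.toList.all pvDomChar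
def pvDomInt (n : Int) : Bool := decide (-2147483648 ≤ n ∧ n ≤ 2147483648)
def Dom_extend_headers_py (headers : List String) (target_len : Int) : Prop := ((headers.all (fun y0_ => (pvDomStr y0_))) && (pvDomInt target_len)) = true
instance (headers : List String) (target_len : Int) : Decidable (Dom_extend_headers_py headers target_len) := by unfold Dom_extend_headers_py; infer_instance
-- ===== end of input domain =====

-- B replaces A's forward seen-counter dedupe by total counts + a BACKWARD decrementing pass that
-- builds the output back-to-front; alternative decomposition, same O(n) cost.

-- ===== PORT A =====
-- helper _dedupe_headers: counter dict + output list, one step per header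
def dedupeStep (st : PySem.Dict String Int × List String) (header : String) :
    PySem.Dict String Int × List String :=
  let count := st.1.getD header 0
  (st.1.insert header (count + 1),
   st.2 ++ [if count ≠ 0 then header ++ "_" ++ PySem.Int.toStr count else header])

def dedupe_headers_py (headers : List String) : List String :=
  (headers.foldl dedupeStep (PySem.Dict.empty, [])).2

def extend_headers_py (headers : List String) (target_len : Int) : List String :=
  if (headers.length : Int) ≥ target_len then headers
  else
    let start : Int := (headers.length : Int) + 1
    let extended := (PySem.List.pyRange start (target_len + 1) 1).foldl
        (fun acc idx => acc ++ ["extra_col_" ++ PySem.Int.toStr idx]) headers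
    dedupe_headers_py extended

-- ===== PORT B =====
-- remaining[n] = remaining.get(n, 0) + 1
def totalsStep (d : PySem.Dict String Int) (n : String) : PySem.Dict String Int :=
  d.insert n (d.getD n 0 + 1)

-- remaining[n] -= 1; k = remaining[n]; out.append(...)   (n is always a key here, so
-- Python's r[n] subscript never raises and equals getD; decrement ported as insert of getD-1)
def revStep (st : PySem.Dict String Int × List String) (n : String) :
    PySem.Dict String Int × List String :=
  let k := st.1.getD n 0 - 1
  (st.1.insert n k, st.2 ++ [if k = 0 then n else n ++ "_" ++ PySem.Int.toStr k])

def extend_headers_py_alt (headers : List String) (target_len : Int) : List String :=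
  if (headers.length : Int) ≥ target_len then headers
  else
    let names := headers ++ (PySem.List.pyRange ((headers.length : Int) + 1) (target_len + 1) 1).map
        (fun i => "extra_col_" ++ PySem.Int.toStr i)
    let remaining := names.foldl totalsStep PySem.Dict.empty
    ((names.reverse.foldl revStep (remaining, [])).2).reverse

-- ===== PRECONDITION & SPEC =====
def Spec_extend_headers_py (headers : List String) (target_len : Int) (out : List String) : Prop := out = extend_headers_py_alt headers target_len
instance (headers : List String) (target_len : Int) (out : List String) : Decidable (Spec_extend_headers_py headers target_len out) := by unfold Spec_extend_headers_py; infer_instance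

-- ===== CLAIM (what is proved, stated in full; the proofs are below) =====
def Claim_equal_extend_headers_py : Prop := ∀ (headers : List String) (target_len : Int), Dom_extend_headers_py headers target_len → Spec_extend_headers_py headers target_len (extend_headers_py headers target_len)

-- ===== LEMMAS AND PROOFS =====

-- A's padding loop appends one element per index: it builds headers ++ (names of the range)
theorem foldl_append_singleton (f : Int → String) (r : List Int) (xs : List String) :
    r.foldl (fun acc idx => acc ++ [f idx]) xs = xs ++ r.map f := by
  induction r generalizing xs with
  | nil => simp
  | cons a t ih => simp [List.foldl_cons, ih]

-- emitted element for one position, given the earlier part of the list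
def emit1 (l : List String) (a : String) : String :=
  if l.count a = 0 then a else a ++ "_" ++ PySem.Int.toStr ((l.count a : Nat) : Int)

def dmap : List String → List String :=
  fun l => l.reverse.foldr (fun _ acc => acc) []  -- placeholder, unused

-- canonical spec list: element for each prefix
def cmap : List String → List String
  | [] => []
  | _ => []

-- the real spec, by snoc recursion via foldl
def specList (l : List String) : List String :=
  (PySem.List.enumerate l 0).map (fun p =>
    emit1 (PySem.List.slice l none (some p.1)) p.2)

theorem specList_snoc (l : List String) (a : String) :
    specList (l ++ [a]) = specList l ++ [emit1 l a] := by
  unfold specList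
  rw [PySem.List.enumerate_append, List.map_append]
  congr 1
  · apply List.map_congr_left
    intro p hp
    rcases (PySem.List.mem_enumerate_iff l 0 p).1 hp with ⟨k, hk, rfl⟩
    simp only [zero_add, PySem.List.slice_to_natCast, List.take_append_of_le_length (le_of_lt hk)]
  · simp [PySem.List.enumerate, PySem.List.slice_to_natCast]

-- A-side: the dedupe fold computes specList, its dict holding prefix counts
theorem dedupe_fold_inv (l : List String) :
    ((l.foldl dedupeStep (PySem.Dict.empty, [])).2 = specList l) ∧
    (∀ x, (l.foldl dedupeStep (PySem.Dict.empty, [])).1.getD x 0 = (l.count x : Int)) := by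
  induction l using List.reverseRecOn with
  | nil =>
    refine ⟨rfl, fun x => ?_⟩
    simp [PySem.Dict.getD, PySem.Dict.get?, PySem.Dict.empty]
  | append_singleton l a ih =>
    obtain ⟨ih2, ih1⟩ := ih
    rw [List.foldl_append]
    constructor
    · simp only [List.foldl_cons, List.foldl_nil, dedupeStep, ih1 a, ih2, specList_snoc, emit1]
      congr 1
      by_cases h : l.count a = 0 <;> simp [h]
    · intro x
      simp only [List.foldl_cons, List.foldl_nil, dedupeStep, ih1 a]
      rw [PySem.Dict.getD_insert]
      rcases eq_or_ne x a with h | h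
      · simp [h, List.count_append]
      · simp [h, ih1, List.count_append, h.symm]

theorem dedupe_eq_specList (l : List String) : dedupe_headers_py l = specList l :=
  (dedupe_fold_inv l).1

-- B-side lemma 1: the totals dict holds the full occurrence counts
theorem totals_getD (l : List String) (d : PySem.Dict String Int) (x : String) :
    (l.foldl totalsStep d).getD x 0 = d.getD x 0 + (l.count x : Int) := by
  induction l generalizing d with
  | nil => simp
  | cons a t ih =>
    simp only [List.foldl_cons, totalsStep, ih, PySem.Dict.getD_insert]
    rcases eq_or_ne x a with h | h
    · simp [h]; ring
    · simp [h, h.symm]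

-- B-side lemma 2: the backward decrementing fold emits (specList l).reverse
theorem revfold (l : List String) (d : PySem.Dict String Int) (acc : List String)
    (hd : ∀ x, d.getD x 0 = (l.count x : Int)) :
    (l.reverse.foldl revStep (d, acc)).2 = acc ++ (specList l).reverse := by
  induction l using List.reverseRecOn generalizing d acc with
  | nil => simp [specList, PySem.List.enumerate]
  | append_singleton l a ih =>
    rw [List.reverse_append]
    simp only [List.reverse_cons, List.reverse_nil, List.nil_append, List.singleton_append,
      List.foldl_cons]
    have hka : d.getD a 0 - 1 = (l.count a : Int) := by
      rw [hd a]; simp [List.count_append]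
    have hstep : revStep (d, acc) a =
        (d.insert a (l.count a : Int), acc ++ [emit1 l a]) := by
      simp only [revStep, hka, emit1]
      congr 1
      by_cases h : l.count a = 0 <;> simp [h]
    rw [hstep, ih]
    · rw [specList_snoc]
      simp
    · intro x
      rw [PySem.Dict.getD_insert]
      rcases eq_or_ne x a with h | h
      · simp [h]
      · simp [h, hd x, List.count_append, h.symm]

-- ===== VERDICT (by name: the statement is the Claim_ definition above) =====
theorem extend_headers_py_spec : Claim_equal_extend_headers_py := by
  intro headers target_len _
  unfold Spec_extend_headers_py extend_headers_py extend_headers_py_alt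
  split
  · rfl
  · simp only [foldl_append_singleton, dedupe_eq_specList]
    rw [revfold]
    · simp
    · intro x
      rw [totals_getD]
      simp [PySem.Dict.getD, PySem.Dict.get?, PySem.Dict.empty]
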